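-- pv_equiv track=rewrite | github.com/Sheriffy4/intellirefactor | intellirefactor/analysis/block_extractor.py | _tokenize_source
-- ===== SOURCE A (Python) =====
-- from typing import List, Set
--
-- def _tokenize_source(source_code: str) -> List[str]:
--     """Tokenize source code for exact fingerprinting."""
--     # Simple tokenization - split on whitespace and punctuation
--     tokens = []
--     buf = ""
--
--     for char in source_code:
--         if char.isalnum() or char == "_":
--             buf += char
--         else:
--             if buf:
--                 tokens.append(buf)
--                 buf = ""
--             if not char.isspace():
--                 tokens.append(char)
--
--     if buf:
--         tokens.append(buf)
--
--     return [t for t in tokens if t.strip()]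
-- ===== SOURCE B (Python) =====
-- from itertools import groupby
-- from typing import List
--
-- def _tokenize_source(source_code: str) -> List[str]:
--     """Tokenize source code for exact fingerprinting (groupby over word/non-word runs)."""
--     tokens = []
--     for is_word, run in groupby(source_code, key=lambda c: c.isalnum() or c == "_"):
--         if is_word:
--             tokens.append("".join(run))
--         else:
--             for char in run:
--                 if not char.isspace():
--                     tokens.append(char)
--     return [t for t in tokens if t.strip()]
-- ===== Notes on version B (the rewrite author's own statement) =====
-- stated objective: idiomatic
-- what changed: B replaces A's character-by-character buffer accumulation with itertools.groupby splitting the source into maximal word/non-word runs, emitting each word run whole and each non-space punctuation char individually.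
import Mathlib
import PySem

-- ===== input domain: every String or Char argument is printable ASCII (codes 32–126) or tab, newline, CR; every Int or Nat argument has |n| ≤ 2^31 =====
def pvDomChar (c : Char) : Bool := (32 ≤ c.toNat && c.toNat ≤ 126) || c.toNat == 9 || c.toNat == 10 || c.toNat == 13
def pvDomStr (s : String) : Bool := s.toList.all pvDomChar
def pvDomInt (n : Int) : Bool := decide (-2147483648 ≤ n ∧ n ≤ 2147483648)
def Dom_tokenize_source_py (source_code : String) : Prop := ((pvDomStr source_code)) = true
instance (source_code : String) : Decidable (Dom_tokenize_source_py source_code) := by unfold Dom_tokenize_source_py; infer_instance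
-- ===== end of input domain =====

-- B rewrites A's char-by-char buffer loop as an itertools.groupby over maximal word/non-word
-- runs (idiomatic decomposition; same O(n) cost). Both work on code points (exact on Dom's ASCII).

-- ===== PORT A =====
-- char.isalnum() or char == "_"
def pvKey (c : Char) : Bool := PySem.Chars.isalnum c || c == '_'

-- one iteration of A's for-loop; state = (tokens, buf)
def pvStepA (st : List (List Char) × List Char) (c : Char) : List (List Char) × List Char :=
  if pvKey c then (st.1, st.2 ++ [c])
  else
    let toks := if st.2 ≠ [] then st.1 ++ [st.2] else st.1
    let toks := if !PySem.Chars.isspace c then toks ++ [[c]] else toks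
    (toks, [])

def tokenize_source_py (source_code : String) : List String :=
  let st := source_code.toList.foldl pvStepA ([], [])
  let tokens := if st.2 ≠ [] then st.1 ++ [st.2] else st.1
  (tokens.filter (fun t => !(PySem.Chars.strip t).isEmpty)).map String.ofList

-- ===== PORT B =====
-- itertools.groupby(source_code, key = pvKey): list of (key, run) pairs
def pvGroups (cs : List Char) : List (Bool × List Char) :=
  match cs with
  | [] => []
  | c :: rest =>
    (pvKey c, c :: rest.takeWhile (fun d => pvKey d == pvKey c)) ::
      pvGroups (rest.dropWhile (fun d => pvKey d == pvKey c))
  termination_by cs.length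
  decreasing_by
    simp only [List.length_cons]
    exact Nat.lt_succ_of_le (List.length_dropWhile_le _ _)

def tokenize_source_py_alt (source_code : String) : List String :=
  let tokens := (pvGroups source_code.toList).flatMap (fun g =>
    if g.1 then [g.2]
    else (g.2.filter (fun c => !PySem.Chars.isspace c)).map (fun c => [c]))
  (tokens.filter (fun t => !(PySem.Chars.strip t).isEmpty)).map String.ofList

-- ===== PRECONDITION & SPEC =====
def Spec_tokenize_source_py (source_code : String) (out : List String) : Prop := out = tokenize_source_py_alt source_code
instance (source_code : String) (out : List String) : Decidable (Spec_tokenize_source_py source_code out) := by unfold Spec_tokenize_source_py; infer_instance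

-- ===== CLAIM (what is proved, stated in full; the proofs are below) =====
def Claim_equal_tokenize_source_py : Prop := ∀ (source_code : String), Dom_tokenize_source_py source_code → Spec_tokenize_source_py source_code (tokenize_source_py source_code)

-- ===== LEMMAS AND PROOFS =====

-- A's loop result (tokens list incl. trailing buf flush), starting from buffer `buf`
def pvF (buf : List Char) (cs : List Char) : List (List Char) :=
  let st := cs.foldl pvStepA ([], buf)
  if st.2 ≠ [] then st.1 ++ [st.2] else st.1

-- B's token list
def pvG (cs : List Char) : List (List Char) :=
  (pvGroups cs).flatMap (fun g =>
    if g.1 then [g.2]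
    else (g.2.filter (fun c => !PySem.Chars.isspace c)).map (fun c => [c]))

lemma pvGroups_cons (c : Char) (rest : List Char) :
    pvGroups (c :: rest) =
      (pvKey c, c :: rest.takeWhile (fun d => pvKey d == pvKey c)) ::
        pvGroups (rest.dropWhile (fun d => pvKey d == pvKey c)) := by
  rw [pvGroups]

-- already-emitted tokens just ride along as a prefix of the fold state
lemma pvStep_accum (cs : List Char) : ∀ (toks : List (List Char)) (buf : List Char),
    (cs.foldl pvStepA (toks, buf)).1 = toks ++ (cs.foldl pvStepA ([], buf)).1 ∧
    (cs.foldl pvStepA (toks, buf)).2 = (cs.foldl pvStepA ([], buf)).2 := by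
  induction cs with
  | nil => intro toks buf; simp
  | cons c rest ih =>
    intro toks buf
    have hstep : ∀ (t : List (List Char)) (b : List Char),
        pvStepA (t, b) c = (t ++ (pvStepA ([], b) c).1, (pvStepA ([], b) c).2) := by
      intro t b
      by_cases hk : pvKey c
      · simp [pvStepA, hk]
      · by_cases hb : b = [] <;> by_cases hs : PySem.Chars.isspace c <;>
          simp [pvStepA, hk, hb, hs]
    simp only [List.foldl_cons, hstep toks buf]
    obtain ⟨h1, h2⟩ := ih (toks ++ (pvStepA ([], buf) c).1) (pvStepA ([], buf) c).2
    obtain ⟨h1', h2'⟩ := ih (pvStepA ([], buf) c).1 (pvStepA ([], buf) c).2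
    constructor
    · rw [h1, h1', List.append_assoc]
    · rw [h2, h2']

lemma pvF_accum (cs : List Char) (toks : List (List Char)) (buf : List Char) :
    (if (cs.foldl pvStepA (toks, buf)).2 ≠ [] then
        (cs.foldl pvStepA (toks, buf)).1 ++ [(cs.foldl pvStepA (toks, buf)).2]
      else (cs.foldl pvStepA (toks, buf)).1) = toks ++ pvF buf cs := by
  obtain ⟨h1, h2⟩ := pvStep_accum cs toks buf
  simp only [pvF, h1, h2]
  split_ifs <;> simp

-- the punctuation-run decomposition of pvG (one unfold; no induction)
lemma pvG_punct_run (cs : List Char) :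
    pvG cs = ((cs.takeWhile (fun d => pvKey d == false)).filter
                (fun c => !PySem.Chars.isspace c)).map (fun c => [c])
             ++ pvG (cs.dropWhile (fun d => pvKey d == false)) := by
  cases cs with
  | nil => simp [pvG, pvGroups]
  | cons c rest =>
    by_cases hk : pvKey c
    · simp [hk]
    · simp only [Bool.not_eq_true] at hk
      simp [pvG, pvGroups_cons, hk]

lemma pvG_cons_punct {c : Char} (rest : List Char) (hc : pvKey c = false) :
    pvG (c :: rest) = (if PySem.Chars.isspace c then [] else [[c]]) ++ pvG rest := by
  rw [pvG_punct_run (c :: rest), pvG_punct_run rest]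
  simp only [List.takeWhile_cons, List.dropWhile_cons, hc, beq_self_eq_true, if_true,
    List.filter_cons]
  by_cases hs : PySem.Chars.isspace c <;> simp [hs]

-- main invariant, by strong induction on the length
lemma pv_main : ∀ (n : Nat) (cs : List Char), cs.length ≤ n →
    (∀ buf, buf ≠ [] →
        pvF buf cs = (buf ++ cs.takeWhile pvKey) :: pvG (cs.dropWhile pvKey)) ∧
    pvF [] cs = pvG cs := by
  intro n
  induction n with
  | zero =>
    intro cs hlen
    have : cs = [] := List.eq_nil_of_length_eq_zero (Nat.le_zero.mp hlen)
    subst this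
    exact ⟨fun buf hb => by simp [pvF, pvG, pvGroups, hb], by simp [pvF, pvG, pvGroups]⟩
  | succ n ih =>
    intro cs hlen
    cases cs with
    | nil =>
      exact ⟨fun buf hb => by simp [pvF, pvG, pvGroups, hb], by simp [pvF, pvG, pvGroups]⟩
    | cons c rest =>
      have hr : rest.length ≤ n := Nat.lt_succ_iff.mp (by simpa using hlen)
      constructor
      · intro buf hb
        by_cases hk : pvKey c
        · -- word char: extend the buffer
          have step : pvF buf (c :: rest) = pvF (buf ++ [c]) rest := by
            simp [pvF, pvStepA, hk]
          rw [step, ((ih rest hr).1 (buf ++ [c]) (by simp))]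
          simp [hk, List.append_assoc]
        · -- punctuation: flush buf, maybe emit c
          have hk' : pvKey c = false := by simpa using hk
          have step : pvF buf (c :: rest) =
              ([buf] ++ if PySem.Chars.isspace c then [] else [[c]]) ++ pvF [] rest := by
            simp only [pvF, List.foldl_cons, pvStepA, hk', Bool.false_eq_true, if_false,
              hb, ne_eq, not_false_eq_true, if_pos]
            by_cases hs : PySem.Chars.isspace c <;>
              simpa [hs, pvF] using
                pvF_accum rest ([buf] ++ if PySem.Chars.isspace c then [] else [[c]]) []
          rw [step, (ih rest hr).2, List.takeWhile_cons, List.dropWhile_cons]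
          simp only [hk', Bool.false_eq_true, if_false, List.append_nil]
          rw [pvG_cons_punct rest hk']
          simp
      · by_cases hk : pvKey c
        · have step : pvF [] (c :: rest) = pvF [c] rest := by
            simp [pvF, pvStepA, hk]
          rw [step, ((ih rest hr).1 [c] (by simp))]
          have hpred : (fun d => pvKey d == pvKey c) = pvKey := by
            funext d; simp [hk]
          conv_rhs => rw [pvG, pvGroups_cons, hpred]
          simp [pvG, hk]
        · have hk' : pvKey c = false := by simpa using hk
          have step : pvF [] (c :: rest) =
              (if PySem.Chars.isspace c then [] else [[c]]) ++ pvF [] rest := by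
            simp only [pvF, List.foldl_cons, pvStepA, hk', Bool.false_eq_true, if_false,
              ne_eq, not_true_eq_false, if_neg, not_false_eq_true, List.nil_append]
            by_cases hs : PySem.Chars.isspace c <;>
              simpa [hs, pvF] using
                pvF_accum rest (if PySem.Chars.isspace c then [] else [[c]]) []
          rw [step, (ih rest hr).2, pvG_cons_punct rest hk']

-- ===== VERDICT (by name: the statement is the Claim_ definition above) =====
theorem tokenize_source_py_spec : Claim_equal_tokenize_source_py := by
  intro s _
  unfold Spec_tokenize_source_py
  have h : pvF [] s.toList = pvG s.toList := (pv_main s.toList.length s.toList le_rfl).2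
  simp only [pvF, pvG] at h
  simp only [tokenize_source_py, tokenize_source_py_alt]
  exact congrArg
    (fun tokens : List (List Char) =>
      (tokens.filter (fun t => !(PySem.Chars.strip t).isEmpty)).map String.ofList) h
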